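-- pv_equiv track=rewrite | github.com/eVen-gits/advent_of_code_2021 | day_15/code.py | extend_data
-- ===== SOURCE A (Python) =====
-- def extend_data(data, reps=5):
--     m, n = len(data), len(data[0])
--     new_data = [[0 for _ in range(n*reps)] for _ in range(m*reps)]
--     for mul_x in range(reps):
--         for mul_y in range(reps):
--             for x, y in [(x, y) for x in range(n) for y in range(m)]:
--                 my, mx = mul_y*m+y, mul_x*n+x
--                 new_val = (data[y][x] + mul_x + mul_y)
--                 if new_val > 9:
--                     new_val = new_val % 10 + 1
--
--                 new_data[my][mx] = new_val
--
--     return new_data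
-- ===== SOURCE B (Python) =====
-- def _bump(v):
--     return v if v <= 9 else v % 10 + 1
--
--
-- def extend_data(data, reps=5):
--     n = len(data[0])
--     # tile k = original grid with every cell bumped by k (wrap applied once);
--     # only 2*reps-1 distinct tiles exist, indexed by mul_x+mul_y.
--     tiles = [[[_bump(row[x] + k) for x in range(n)] for row in data]
--              for k in range(2 * reps - 1)]
--     out = []
--     for ty in range(reps):
--         for y in range(len(data)):
--             row = []
--             for tx in range(reps):
--                 row += tiles[tx + ty][y]
--             out.append(row)
--     return out
-- ===== Notes on version B (the rewrite author's own statement) =====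
-- stated objective: alternative
-- what changed: Instead of triple-nested index loops writing each of the reps^2 tiles cell-by-cell into a preallocated grid, B precomputes the 2*reps-1 distinct bumped tiles once (tile index = mul_x+mul_y) and assembles the output row-by-row by concatenating tile rows.
import Mathlib
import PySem

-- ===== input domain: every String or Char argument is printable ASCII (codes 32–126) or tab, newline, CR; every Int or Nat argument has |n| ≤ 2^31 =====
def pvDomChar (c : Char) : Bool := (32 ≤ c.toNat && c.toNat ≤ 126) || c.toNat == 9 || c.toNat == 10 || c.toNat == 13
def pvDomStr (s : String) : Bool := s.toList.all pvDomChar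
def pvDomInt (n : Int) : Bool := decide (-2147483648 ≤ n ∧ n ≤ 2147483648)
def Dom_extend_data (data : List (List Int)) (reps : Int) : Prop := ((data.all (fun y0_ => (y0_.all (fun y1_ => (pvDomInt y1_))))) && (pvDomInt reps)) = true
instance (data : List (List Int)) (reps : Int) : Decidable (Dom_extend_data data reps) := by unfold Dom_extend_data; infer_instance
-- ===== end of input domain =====

-- B precomputes the 2*reps-1 distinct bumped tiles once and concatenates their rows,
-- instead of A's triple-nested index loops writing every cell of a preallocated grid (objective: alternative).

-- ===== PORT A =====
-- data[0] is ported as headD [] and data[y][x] as pyGetD with default: exact under Pre_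
-- (data nonempty, every row at least as long as row 0 when reps ≥ 1; outside, Python raises IndexError).
-- The write new_data[my][mx] = v is modify/set with .toNat: my, mx come from ranges, hence are
-- nonnegative and within the preallocated grid, so this is exact.
def extend_data (data : List (List Int)) (reps : Int) : List (List Int) :=
  let m : Int := (data.length : Int)
  let n : Int := ((data.headD []).length : Int)
  let newData : List (List Int) :=
    (PySem.List.pyRange 0 (m * reps) 1).map fun _ =>
      (PySem.List.pyRange 0 (n * reps) 1).map fun _ => (0 : Int)
  (PySem.List.pyRange 0 reps 1).foldl (fun nd mulx =>
    (PySem.List.pyRange 0 reps 1).foldl (fun nd muly =>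
      ((PySem.List.pyRange 0 n 1).flatMap fun x =>
        (PySem.List.pyRange 0 m 1).map fun y => (x, y)).foldl (fun nd xy =>
          let my := muly * m + xy.2
          let mx := mulx * n + xy.1
          let newVal := PySem.List.pyGetD (PySem.List.pyGetD data xy.2 []) xy.1 0 + mulx + muly
          let newVal := if newVal > 9 then PySem.Int.mod newVal 10 + 1 else newVal
          nd.modify my.toNat (fun row => row.set mx.toNat newVal)) nd) nd) newData

-- ===== PORT B =====
def pvBump (v : Int) : Int := if v ≤ 9 then v else PySem.Int.mod v 10 + 1

-- row[x] is ported as pyGetD (exact under Pre_, where every row has length ≥ n);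
-- tiles[tx+ty] as pyGetD (the index is provably in range whenever the loops run).
def extend_data_alt (data : List (List Int)) (reps : Int) : List (List Int) :=
  let n : Int := ((data.headD []).length : Int)
  let tiles : List (List (List Int)) :=
    (PySem.List.pyRange 0 (2 * reps - 1) 1).map fun k =>
      data.map fun row => (PySem.List.pyRange 0 n 1).map fun x =>
        pvBump (PySem.List.pyGetD row x 0 + k)
  (PySem.List.pyRange 0 reps 1).foldl (fun out ty =>
    (PySem.List.pyRange 0 ((data.length : Int)) 1).foldl (fun out y =>
      out ++ [(PySem.List.pyRange 0 reps 1).foldl (fun row tx =>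
        row ++ PySem.List.pyGetD (PySem.List.pyGetD tiles (tx + ty) []) y []) []]) out) []

-- ===== PRECONDITION & SPEC =====
-- Pre_ excludes exactly the inputs on which Python A raises IndexError: empty data
-- (data[0] fails) and, when reps ≥ 1, a row shorter than row 0 (data[y][x] fails).
def Pre_extend_data (data : List (List Int)) (reps : Int) : Prop :=
  data ≠ [] ∧ (1 ≤ reps → ∀ row ∈ data, (data.headD []).length ≤ row.length)
instance (data : List (List Int)) (reps : Int) : Decidable (Pre_extend_data data reps) := by
  unfold Pre_extend_data; infer_instance

def pvWitness_extend_data : List (List Int) × Int := ([[1, 8], [9, 2]], 2)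

def Spec_extend_data (data : List (List Int)) (reps : Int) (out : List (List Int)) : Prop :=
  out = extend_data_alt data reps
instance (data : List (List Int)) (reps : Int) (out : List (List Int)) : Decidable (Spec_extend_data data reps out) := by
  unfold Spec_extend_data; infer_instance

-- ===== CLAIM (what is proved, stated in full; the proofs are below) =====
def Claim_equal_extend_data : Prop := ∀ (data : List (List Int)) (reps : Int), Dom_extend_data data reps → Pre_extend_data data reps → Spec_extend_data data reps (extend_data data reps)

-- ===== LEMMAS AND PROOFS =====

-- the value A writes at tile (s = mul_x, t = mul_y), cell (x, y)
def cellV (data : List (List Int)) (t s y x : Nat) : Int :=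
  let v0 := (data.getD y []).getD x 0 + (s : Int) + (t : Int)
  if v0 > 9 then PySem.Int.mod v0 10 + 1 else v0

-- the common normal form of both ports
def midGrid (data : List (List Int)) (r m n : Nat) : List (List Int) :=
  (List.range r).flatMap fun t => (List.range m).map fun y =>
    (List.range r).flatMap fun s => (List.range n).map fun x => cellV data t s y x

def setCell (g : List (List Int)) (p : Nat × Nat) (v : Int) : List (List Int) :=
  g.modify p.1 (fun row => row.set p.2 v)

def writeAll (ws : List ((Nat × Nat) × Int)) (g : List (List Int)) : List (List Int) :=
  ws.foldl (fun g w => setCell g w.1 w.2) g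

def getC (g : List (List Int)) (p : Nat × Nat) : Option Int :=
  g[p.1]?.bind fun row => row[p.2]?

def pairsNM (n m : Nat) : List (Nat × Nat) :=
  (List.range n).flatMap fun x => (List.range m).map fun y => (x, y)

def wsList (data : List (List Int)) (r m n : Nat) : List ((Nat × Nat) × Int) :=
  (List.range r).flatMap fun s => (List.range r).flatMap fun t =>
    (pairsNM n m).map fun xy => ((t * m + xy.2, s * n + xy.1), cellV data t s xy.2 xy.1)

def zeroGrid (R C : Nat) : List (List Int) := List.replicate R (List.replicate C (0 : Int))

lemma bump_eq (v : Int) : (if v > 9 then PySem.Int.mod v 10 + 1 else v) = pvBump v := by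
  unfold pvBump; split_ifs <;> omega

lemma encode_inj {B a1 a2 b1 b2 : Nat} (h1 : b1 < B) (h2 : b2 < B)
    (h : a1 * B + b1 = a2 * B + b2) : a1 = a2 ∧ b1 = b2 := by
  have hB : 0 < B := by omega
  have e1 : (a1 * B + b1) / B = a1 := by
    rw [Nat.mul_comm a1 B, Nat.mul_add_div hB]; simp [Nat.div_eq_of_lt h1]
  have e2 : (a2 * B + b2) / B = a2 := by
    rw [Nat.mul_comm a2 B, Nat.mul_add_div hB]; simp [Nat.div_eq_of_lt h2]
  have ha : a1 = a2 := by rw [← e1, ← e2, h]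
  subst ha
  exact ⟨rfl, by omega⟩

lemma chunkLen {α : Type} (g : Nat → List α) (m : Nat) (h : ∀ t, (g t).length = m) :
    ∀ r, ((List.range r).flatMap g).length = r * m := by
  intro r
  induction r with
  | zero => simp
  | succ r ih =>
    rw [List.range_succ, List.flatMap_append, List.length_append, ih]
    simp [h r, Nat.succ_mul]

lemma chunkGet {α : Type} (g : Nat → List α) (m : Nat) (h : ∀ t, (g t).length = m)
    (r t y : Nat) (ht : t < r) (hy : y < m) :
    ((List.range r).flatMap g)[t * m + y]? = (g t)[y]? := by
  induction r with
  | zero => omega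
  | succ r ih =>
    rw [List.range_succ, List.flatMap_append]
    rcases Nat.lt_or_ge t r with hlt | hge
    · rw [List.getElem?_append_left, ih hlt]
      rw [chunkLen g m h r]
      calc t * m + y < t * m + m := by omega
        _ = (t + 1) * m := by ring
        _ ≤ r * m := Nat.mul_le_mul_right m (by omega)
    · have ht' : t = r := by omega
      subst ht'
      rw [List.getElem?_append_right (by rw [chunkLen g m h t]; omega)]
      rw [chunkLen g m h t]
      simp

-- setCell / writeAll preserve the shape of the grid
lemma length_writeAll (ws : List ((Nat × Nat) × Int)) (g : List (List Int)) :
    (writeAll ws g).length = g.length := by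
  induction ws generalizing g with
  | nil => rfl
  | cons w ws ih => rw [writeAll, List.foldl_cons, ← writeAll, ih]; simp [setCell]

lemma rowlen_writeAll (ws : List ((Nat × Nat) × Int)) (g : List (List Int)) (i : Nat) :
    ((writeAll ws g)[i]?.map List.length) = (g[i]?.map List.length) := by
  induction ws generalizing g with
  | nil => rfl
  | cons w ws ih =>
    rw [writeAll, List.foldl_cons, ← writeAll, ih]
    simp only [setCell, List.getElem?_modify]
    cases g[i]? with
    | none => rfl
    | some row => simp only [Option.map_some]; split_ifs <;> simp

lemma getC_setCell_ne (g : List (List Int)) (q p : Nat × Nat) (v : Int) (h : q ≠ p) :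
    getC (setCell g q v) p = getC g p := by
  unfold getC setCell
  rw [List.getElem?_modify]
  cases hg : g[p.1]? with
  | none => rfl
  | some row =>
    simp only [Option.bind_some]
    by_cases h1 : q.1 = p.1
    · have h2 : q.2 ≠ p.2 := fun h2 => h (Prod.ext h1 h2)
      simp [h1, List.getElem?_set_ne h2]
    · simp [h1]

lemma getC_setCell_self (g : List (List Int)) (p : Nat × Nat) (v : Int) (row : List Int)
    (hg : g[p.1]? = some row) (hlen : p.2 < row.length) :
    getC (setCell g p v) p = some v := by
  unfold getC setCell
  rw [List.getElem?_modify, hg]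
  simp [List.getElem?_set_self (by simpa using hlen)]

lemma getC_writeAll_miss (ws : List ((Nat × Nat) × Int)) (g : List (List Int)) (p : Nat × Nat)
    (h : ∀ w ∈ ws, w.1 ≠ p) : getC (writeAll ws g) p = getC g p := by
  induction ws generalizing g with
  | nil => rfl
  | cons w ws ih =>
    rw [writeAll, List.foldl_cons, ← writeAll]
    rw [ih _ (fun w' hw' => h w' (List.mem_cons_of_mem _ hw'))]
    exact getC_setCell_ne g w.1 p w.2 (h w (List.mem_cons_self))

lemma getC_writeAll_hit (ws : List ((Nat × Nat) × Int)) (g : List (List Int)) (p : Nat × Nat) (v : Int)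
    (hnd : (ws.map Prod.fst).Nodup) (hmem : (p, v) ∈ ws)
    (hrow : ∃ row, g[p.1]? = some row ∧ p.2 < row.length) :
    getC (writeAll ws g) p = some v := by
  induction ws generalizing g with
  | nil => simp at hmem
  | cons w ws ih =>
    obtain ⟨row, hg, hlen⟩ := hrow
    rw [List.map_cons, List.nodup_cons] at hnd
    rw [writeAll, List.foldl_cons, ← writeAll]
    rcases List.mem_cons.mp hmem with heq | htail
    · -- the head is the write of p; no later write touches p
      have hp : w.1 = p := by rw [← heq]
      have hmiss : ∀ w' ∈ ws, w'.1 ≠ p := by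
        intro w' hw' hcon
        exact hnd.1 (hp ▸ hcon ▸ List.mem_map_of_mem hw')
      rw [getC_writeAll_miss ws _ p hmiss, hp]
      have hv : w.2 = v := by rw [← heq]
      rw [hv] at *
      exact getC_setCell_self g p v row hg hlen
    · refine ih (hnd := hnd.2) (hmem := htail) (hrow := ⟨?_, ?_, ?_⟩)
      · exact if w.1.1 = p.1 then row.set w.1.2 w.2 else row
      · unfold setCell
        rw [List.getElem?_modify, hg]
        rfl
      · split_ifs with h1
        · simpa using hlen
        · exact hlen

lemma mem_pairsNM (n m : Nat) (p : Nat × Nat) :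
    p ∈ pairsNM n m ↔ p.1 < n ∧ p.2 < m := by
  unfold pairsNM
  simp only [List.mem_flatMap, List.mem_map, List.mem_range]
  constructor
  · rintro ⟨x, hx, y, hy, rfl⟩; exact ⟨hx, hy⟩
  · rintro ⟨h1, h2⟩; exact ⟨p.1, h1, p.2, h2, rfl⟩

lemma pairsNM_nodup (n m : Nat) : (pairsNM n m).Nodup := by
  unfold pairsNM
  rw [List.nodup_flatMap]
  constructor
  · exact fun x _ => (List.nodup_range).map (fun a b h => by simpa using h)
  · refine (List.pairwise_lt_range).imp ?_
    intro x1 x2 hlt p hp1 hp2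
    simp only [List.mem_map, List.mem_range] at hp1 hp2
    obtain ⟨y1, -, rfl⟩ := hp1
    obtain ⟨y2, -, h⟩ := hp2
    exact absurd (congrArg Prod.fst h).symm (by simp; omega)

lemma wsList_pos_nodup (data : List (List Int)) (r m n : Nat) :
    ((wsList data r m n).map Prod.fst).Nodup := by
  have hcast : (wsList data r m n).map Prod.fst =
      (List.range r).flatMap fun s => (List.range r).flatMap fun t =>
        (pairsNM n m).map fun xy => (t * m + xy.2, s * n + xy.1) := by
    unfold wsList
    simp only [List.map_flatMap, List.map_map]
    rfl
  rw [hcast]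
  have memChunk : ∀ s t (p : Nat × Nat),
      p ∈ ((pairsNM n m).map fun xy => (t * m + xy.2, s * n + xy.1)) →
      ∃ x y, x < n ∧ y < m ∧ p = (t * m + y, s * n + x) := by
    intro s t p hp
    simp only [List.mem_map] at hp
    obtain ⟨xy, hxy, rfl⟩ := hp
    obtain ⟨h1, h2⟩ := (mem_pairsNM n m xy).mp hxy
    exact ⟨xy.1, xy.2, h1, h2, rfl⟩
  rw [List.nodup_flatMap]
  constructor
  · intro s _
    rw [List.nodup_flatMap]
    constructor
    · intro t _
      refine List.Nodup.map_on ?_ (pairsNM_nodup n m)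
      intro xy hxy zw hzw hfe
      obtain ⟨hx1, hy1⟩ := (mem_pairsNM n m xy).mp hxy
      obtain ⟨hx2, hy2⟩ := (mem_pairsNM n m zw).mp hzw
      simp only [Prod.mk.injEq] at hfe
      obtain ⟨-, hyy⟩ := encode_inj hy1 hy2 hfe.1
      obtain ⟨-, hxx⟩ := encode_inj hx1 hx2 hfe.2
      exact Prod.ext hxx hyy
    · refine (List.pairwise_lt_range).imp ?_
      intro t1 t2 hlt p hp1 hp2
      obtain ⟨x1, y1, hx1, hy1, rfl⟩ := memChunk _ _ _ hp1
      obtain ⟨x2, y2, hx2, hy2, he⟩ := memChunk _ _ _ hp2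
      obtain ⟨ht, -⟩ := encode_inj hy1 hy2 (congrArg Prod.fst he)
      omega
  · refine (List.pairwise_lt_range).imp ?_
    intro s1 s2 hlt p hp1 hp2
    simp only [List.mem_flatMap, List.mem_range] at hp1 hp2
    obtain ⟨t1, -, hp1⟩ := hp1
    obtain ⟨t2, -, hp2⟩ := hp2
    obtain ⟨x1, y1, hx1, hy1, rfl⟩ := memChunk _ _ _ hp1
    obtain ⟨x2, y2, hx2, hy2, he⟩ := memChunk _ _ _ hp2
    obtain ⟨hs, -⟩ := encode_inj hx1 hx2 (congrArg Prod.snd he)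
    omega

lemma wsList_mem (data : List (List Int)) (r m n s t x y : Nat)
    (hs : s < r) (ht : t < r) (hx : x < n) (hy : y < m) :
    ((t * m + y, s * n + x), cellV data t s y x) ∈ wsList data r m n := by
  unfold wsList pairsNM
  simp only [List.mem_flatMap, List.mem_map, List.mem_range]
  exact ⟨s, hs, t, ht, ⟨(x, y), ⟨x, hx, y, hy, rfl⟩, rfl⟩⟩

lemma band_lt {s r x n : Nat} (hx : x < n) (hs : s < r) : s * n + x < n * r := by
  calc s * n + x < s * n + n := by omega
    _ = (s + 1) * n := by ring
    _ ≤ r * n := Nat.mul_le_mul_right n (by omega)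
    _ = n * r := Nat.mul_comm r n

lemma writeAll_eq_mid (data : List (List Int)) (r m n : Nat) :
    writeAll (wsList data r m n) (zeroGrid (m * r) (n * r)) = midGrid data r m n := by
  have hmidlen : (midGrid data r m n).length = r * m :=
    chunkLen _ m (fun t => by simp) r
  have hWlen : (writeAll (wsList data r m n) (zeroGrid (m * r) (n * r))).length = m * r := by
    rw [length_writeAll]; simp [zeroGrid]
  have hmr : m * r = r * m := Nat.mul_comm m r
  have hnr : n * r = r * n := Nat.mul_comm n r
  apply List.ext_getElem?
  intro i
  by_cases hi : i < m * r
  · have hm : 0 < m := by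
      rcases Nat.eq_zero_or_pos m with h | h
      · subst h; simp at hi
      · exact h
    have hy : i % m < m := Nat.mod_lt _ hm
    have ht : i / m < r := (Nat.div_lt_iff_lt_mul hm).mpr (by omega)
    have hiy : i = (i / m) * m + i % m := by
      rw [Nat.mul_comm]; exact (Nat.div_add_mod i m).symm
    set t := i / m with htdef
    set y := i % m with hydef
    -- mid side
    have hmid : (midGrid data r m n)[i]? =
        some ((List.range r).flatMap fun s => (List.range n).map fun x => cellV data t s y x) := by
      rw [hiy]
      unfold midGrid
      rw [chunkGet _ m (fun t => by simp) r t y ht hy]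
      simp [hy]
    -- writeAll side: get the row and its length
    have hz : (zeroGrid (m * r) (n * r))[i]? = some (List.replicate (n * r) (0 : Int)) := by
      simp [zeroGrid, hi]
    have hrowlen := rowlen_writeAll (wsList data r m n) (zeroGrid (m * r) (n * r)) i
    rw [hz] at hrowlen
    obtain ⟨rowA, hA, hAlen⟩ : ∃ rowA,
        (writeAll (wsList data r m n) (zeroGrid (m * r) (n * r)))[i]? = some rowA ∧
          rowA.length = n * r := by
      cases hW : (writeAll (wsList data r m n) (zeroGrid (m * r) (n * r)))[i]? with
      | none => rw [hW] at hrowlen; simp at hrowlen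
      | some rowA =>
        rw [hW] at hrowlen
        simp only [Option.map_some, Option.some.injEq] at hrowlen
        exact ⟨rowA, rfl, by simpa using hrowlen⟩
    rw [hA, hmid]
    congr 1
    apply List.ext_getElem?
    intro j
    by_cases hj : j < n * r
    · have hn : 0 < n := by
        rcases Nat.eq_zero_or_pos n with h | h
        · subst h; simp at hj
        · exact h
      have hx : j % n < n := Nat.mod_lt _ hn
      have hs : j / n < r := (Nat.div_lt_iff_lt_mul hn).mpr (by omega)
      have hjx : j = (j / n) * n + j % n := by
        rw [Nat.mul_comm]; exact (Nat.div_add_mod j n).symm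
      set s := j / n with hsdef
      set x := j % n with hxdef
      have hhit := getC_writeAll_hit (wsList data r m n) (zeroGrid (m * r) (n * r))
        (t * m + y, s * n + x) (cellV data t s y x)
        (wsList_pos_nodup data r m n)
        (wsList_mem data r m n s t x y hs ht hx hy)
        ⟨List.replicate (n * r) (0 : Int), by rw [← hiy]; exact hz,
          by simpa using band_lt hx hs⟩
      unfold getC at hhit
      rw [← hiy, hA] at hhit
      simp only [Option.bind_some] at hhit
      rw [hjx, hhit]
      rw [chunkGet _ n (fun s => by simp) r s x hs hx]
      simp [hx]
    · have h1 : rowA[j]? = none := by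
        rw [List.getElem?_eq_none_iff]; omega
      have h2 : ((List.range r).flatMap fun s => (List.range n).map fun x => cellV data t s y x)[j]? = none := by
        rw [List.getElem?_eq_none_iff, chunkLen _ n (fun s => by simp) r]; omega
      rw [h1, h2]
  · rw [List.getElem?_eq_none_iff.mpr (by omega), List.getElem?_eq_none_iff.mpr (by omega)]

lemma pyRange_nonpos (b : Int) (h : b ≤ 0) : PySem.List.pyRange 0 b 1 = [] := by
  simp [PySem.List.pyRange]
  omega

lemma getD_map_lt {α β : Type} (f : α → β) (l : List α) (y : Nat) (d : β) (d' : α)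
    (hy : y < l.length) : (l.map f).getD y d = f (l.getD y d') := by
  rw [List.getD_eq_getElem?_getD, List.getElem?_map, List.getElem?_eq_getElem hy]
  simp [List.getD_eq_getElem?_getD, List.getElem?_eq_getElem hy]

lemma pairs_cast (n m : Nat) :
    (((List.range n).map (fun (k : Nat) => (k : Int))).flatMap fun x =>
        ((List.range m).map (fun (k : Nat) => (k : Int))).map fun y => (x, y)) =
      (pairsNM n m).map fun xy => ((xy.1 : Int), (xy.2 : Int)) := by
  simp only [pairsNM, List.flatMap_map, List.map_flatMap, List.map_map]
  exact List.flatMap_congr fun a _ => by simp [Function.comp_def]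

lemma A_eq_writeAll (data : List (List Int)) (r : Nat) :
    extend_data data (r : Int) =
      writeAll (wsList data r data.length (data.headD []).length)
        (zeroGrid (data.length * r) ((data.headD []).length * r)) := by
  unfold extend_data writeAll wsList
  dsimp only
  have c1 : ((data.length : Int) * (r : Int)) = ((data.length * r : Nat) : Int) := by
    push_cast; ring
  have c2 : (((data.headD []).length : Int) * (r : Int)) =
      (((data.headD []).length * r : Nat) : Int) := by push_cast; ring
  rw [c1, c2, PySem.List.pyRange_zero_natCast, PySem.List.pyRange_zero_natCast,
    PySem.List.pyRange_zero_natCast, PySem.List.pyRange_zero_natCast,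
    PySem.List.pyRange_zero_natCast]
  rw [pairs_cast]
  -- the preallocated zero grid is zeroGrid
  have hz : ((List.range (data.length * r)).map (fun (k : Nat) => (k : Int))).map
      (fun _ => (((List.range ((data.headD []).length * r)).map (fun (k : Nat) => (k : Int))).map
        fun _ => (0 : Int))) =
      zeroGrid (data.length * r) ((data.headD []).length * r) := by
    simp [zeroGrid, Function.comp_def, List.map_const']
  rw [hz]
  rw [List.foldl_map, List.foldl_flatMap]
  refine PySem.List.foldl_congr_mem _ _ _ _ ?_
  intro acc0 s hs
  rw [List.foldl_map, List.foldl_flatMap]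
  refine PySem.List.foldl_congr_mem _ _ _ _ ?_
  intro acc1 t ht
  rw [List.foldl_map, List.foldl_map]
  refine PySem.List.foldl_congr_mem _ _ _ _ ?_
  intro acc2 xy hxy
  obtain ⟨hx, hy⟩ := (mem_pairsNM _ _ xy).mp hxy
  unfold setCell cellV
  have e1 : ((t : Int) * ((data.length : Nat) : Int) + ((xy.2 : Nat) : Int)) =
      ((t * data.length + xy.2 : Nat) : Int) := by push_cast; ring
  have e2 : ((s : Int) * (((data.headD []).length : Nat) : Int) + ((xy.1 : Nat) : Int)) =
      ((s * (data.headD []).length + xy.1 : Nat) : Int) := by push_cast; ring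
  simp only [e1, e2, Int.toNat_natCast, PySem.List.pyGetD_natCast]

lemma alt_eq_mid (data : List (List Int)) (r : Nat) :
    extend_data_alt data (r : Int) = midGrid data r data.length (data.headD []).length := by
  unfold extend_data_alt midGrid
  dsimp only
  rcases Nat.eq_zero_or_pos r with hr | hr
  · subst hr
    simp
  have c0 : (2 * ((r : Nat) : Int) - 1) = ((2 * r - 1 : Nat) : Int) := by omega
  rw [c0, PySem.List.pyRange_zero_natCast, PySem.List.pyRange_zero_natCast,
    PySem.List.pyRange_zero_natCast, PySem.List.pyRange_zero_natCast]
  simp only [List.foldl_map, PySem.List.foldl_append_singleton_eq_map,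
    PySem.List.foldl_append_eq_flatMap, List.nil_append, List.map_map]
  refine List.flatMap_congr fun t hts => ?_
  refine List.map_congr_left fun y hys => ?_
  rw [List.mem_range] at hts hys
  refine List.flatMap_congr fun s hss => ?_
  rw [List.mem_range] at hss
  have cidx : ((s : Int) + (t : Int)) = ((s + t : Nat) : Int) := by push_cast; ring
  simp only [cidx, PySem.List.pyGetD_natCast]
  rw [PySem.List.getD_map_range _ _ _ _ (by omega : s + t < 2 * r - 1)]
  simp only [Function.comp_apply]
  rw [getD_map_lt _ _ _ _ [] hys]
  refine List.map_congr_left fun x hxs => ?_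
  simp only [Function.comp_apply, PySem.List.pyGetD_natCast]
  rw [cellV, ← bump_eq]
  have harg : ((data.getD y []).getD x 0 + (s : Int) + (t : Int)) =
      ((data.getD y []).getD x 0 + ((s + t : Nat) : Int)) := by push_cast; ring
  rw [harg]

lemma both_nil_of_neg (data : List (List Int)) (reps : Int) (h : reps < 0) :
    extend_data data reps = [] ∧ extend_data_alt data reps = [] := by
  constructor
  · unfold extend_data
    dsimp only
    rw [pyRange_nonpos reps (by omega),
      pyRange_nonpos ((data.length : Int) * reps)
        (by have : (0:Int) ≤ (data.length : Int) := by positivity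
            nlinarith)]
    simp
  · unfold extend_data_alt
    dsimp only
    rw [pyRange_nonpos reps (by omega)]
    rfl

-- ===== VERDICT (by name: the statement is the Claim_ definition above) =====
theorem extend_data_spec : Claim_equal_extend_data := by
  intro data reps _hdom _hpre
  unfold Spec_extend_data
  rcases lt_or_ge reps 0 with hneg | hpos
  · rcases both_nil_of_neg data reps hneg with ⟨h1, h2⟩
    rw [h1, h2]
  · obtain ⟨r, rfl⟩ : ∃ r : Nat, reps = (r : Int) := ⟨reps.toNat, by omega⟩
    rw [A_eq_writeAll, writeAll_eq_mid, alt_eq_mid]
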